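-- pv_equiv track=rewrite | github.com/myriadrf/lc-osmo-gsm-tester | src/osmo_gsm_tester/core/resource.py | solve
-- ===== SOURCE A (Python) =====
-- class NotSolvable(Exception):
--     pass
--
-- def solve(all_matches):
--     '''
--     all_matches shall be a list of index-lists.
--     all_matches[i] is the list of indexes that item i can use.
--     Return a solution so that each i gets a different index.
--     solve([ [0, 1, 2],
--             [0],
--             [0, 2] ]) == [1, 0, 2]
--     '''
--
--     def all_differ(l):
--         return len(set(l)) == len(l)
--
--     def search_in_permutations(fixed=[]):
--         idx = len(fixed)
--         for i in range(len(all_matches[idx])):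
--             val = all_matches[idx][i]
--             # don't add a val that's already in the list
--             if val in fixed:
--                 continue
--             l = list(fixed)
--             l.append(val)
--             if len(l) == len(all_matches):
--                 # found a solution
--                 return l
--             # not at the end yet, add next digit
--             r = search_in_permutations(l)
--             if r:
--                 # nested search_in_permutations() call found a solution
--                 return r
--         # this entire branch yielded no solution
--         return None
--
--     if not all_matches:
--         raise RuntimeError('Cannot solve: no candidates')
--
--     solution = search_in_permutations()
--     if not solution:
--         raise NotSolvable('The requested resource requirements are not solvable %r'
--                           % all_matches)
--     return solution
-- ===== SOURCE B (Python) =====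
-- class NotSolvable(Exception):
--     pass
--
-- def solve(all_matches):
--     # Same search order as the original, but: structural recursion on the list of
--     # remaining candidate rows (no index arithmetic), the chosen values carried as a
--     # frozenset for O(1) membership, and the answer assembled back-to-front on the
--     # way out of the recursion instead of threading a growing prefix list down.
--     if not all_matches:
--         raise RuntimeError('Cannot solve: no candidates')
--
--     def go(used, rest):
--         # return the assignment for `rest` (a suffix), or None if impossible
--         if not rest:
--             return []
--         for val in rest[0]:
--             if val not in used:
--                 tail = go(used | frozenset((val,)), rest[1:])
--                 if tail is not None:
--                     return [val] + tail
--         return None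
--
--     sol = go(frozenset(), all_matches)
--     if sol is None:
--         raise NotSolvable('The requested resource requirements are not solvable %r'
--                           % all_matches)
--     return sol
-- ===== Notes on version B (the rewrite author's own statement) =====
-- stated objective: faster
-- what changed: Replaced A's index-driven recursion that threads a growing prefix list (copied and linearly scanned for membership at every node) by structural recursion on the remaining candidate rows carrying a frozenset of used values, assembling the result back-to-front on return; the search order and returned assignment are identical.
-- outside the precondition, e.g. on solve([]): A raises RuntimeError, B raises RuntimeError; on solve([[0], [0]]): A raises NotSolvable, B raises NotSolvable
import Mathlib
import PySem

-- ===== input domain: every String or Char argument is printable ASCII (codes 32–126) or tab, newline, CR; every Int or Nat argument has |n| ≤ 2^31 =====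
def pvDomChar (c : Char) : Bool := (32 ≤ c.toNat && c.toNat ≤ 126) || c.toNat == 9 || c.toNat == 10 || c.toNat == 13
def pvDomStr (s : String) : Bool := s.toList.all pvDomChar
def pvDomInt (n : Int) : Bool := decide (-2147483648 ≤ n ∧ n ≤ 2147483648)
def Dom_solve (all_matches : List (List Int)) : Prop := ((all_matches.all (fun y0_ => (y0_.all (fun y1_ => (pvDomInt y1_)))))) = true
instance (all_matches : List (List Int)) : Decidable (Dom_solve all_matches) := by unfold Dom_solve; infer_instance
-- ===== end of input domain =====

-- B replaces A's index-driven recursion threading a growing prefix list by structural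
-- recursion on the remaining candidate rows with a set of used values, assembling the
-- answer back-to-front; same search order, hence the same returned assignment.

-- ===== PORT A =====
-- A's search_in_permutations: recursion depth is bounded by the number of rows, the
-- fuel parameter (initially all_matches.length) only makes that recursion structural.
mutual
def searchA (am : List (List Int)) : Nat → List Int → Option (List Int)
  | 0, _ => none
  | fuel + 1, fixed => searchAGo am fuel fixed ((am[fixed.length]?).getD [])
termination_by fuel _ => (fuel, 0)

def searchAGo (am : List (List Int)) : Nat → List Int → List Int → Option (List Int)
  | _, _, [] => none
  | fuel, fixed, val :: cands =>
    if val ∈ fixed then searchAGo am fuel fixed cands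
    else
      let l := fixed ++ [val]
      if l.length = am.length then some l
      else
        match searchA am fuel l with
        | some r => some r
        | none => searchAGo am fuel fixed cands
termination_by fuel _ cl => (fuel, cl.length + 1)
end

-- the two `raise` branches of A (empty input / NotSolvable) are excluded by Pre_solve
def solve (all_matches : List (List Int)) : List Int :=
  if all_matches = [] then []
  else
    match searchA all_matches all_matches.length [] with
    | some s => s
    | none => []

-- ===== PORT B =====
mutual
def goB (used : PySem.Set Int) : List (List Int) → Option (List Int)
  | [] => some []
  | cands :: rest => goBLoop used cands rest
termination_by rest => (rest.length, 0)

def goBLoop (used : PySem.Set Int) : List Int → List (List Int) → Option (List Int)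
  | [], _ => none
  | val :: cs, rest =>
    if PySem.Set.contains used val then goBLoop used cs rest
    else
      match goB (PySem.Set.add used val) rest with
      | some tail => some (val :: tail)
      | none => goBLoop used cs rest
termination_by cs rest => (rest.length, cs.length + 1)
end

-- the two `raise` branches of B (empty input / NotSolvable) are excluded by Pre_solve
def solve_alt (all_matches : List (List Int)) : List Int :=
  if all_matches = [] then []
  else
    match goB PySem.Set.empty all_matches with
    | some s => s
    | none => []

-- ===== PRECONDITION & SPEC =====
-- the cartesian product of the candidate rows (all ways to pick one index per item)
def pyProduct : List (List Int) → List (List Int)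
  | [] => [[]]
  | l :: rest => l.flatMap (fun v => (pyProduct rest).map (fun t => v :: t))

-- Pre_ excludes exactly the inputs where A raises: the empty list (RuntimeError) and
-- instances with no duplicate-free assignment (NotSolvable).
def Pre_solve (all_matches : List (List Int)) : Prop :=
  all_matches ≠ [] ∧ ∃ sol ∈ pyProduct all_matches, sol.Nodup
instance (all_matches : List (List Int)) : Decidable (Pre_solve all_matches) := by
  unfold Pre_solve; infer_instance

def pvWitness_solve : List (List Int) := [[0, 1, 2], [0], [0, 2]]

def Spec_solve (all_matches : List (List Int)) (out : List Int) : Prop := out = solve_alt all_matches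
instance (all_matches : List (List Int)) (out : List Int) : Decidable (Spec_solve all_matches out) := by unfold Spec_solve; infer_instance

-- ===== CLAIM (what is proved, stated in full; the proofs are below) =====
def Claim_equal_solve : Prop := ∀ (all_matches : List (List Int)), Dom_solve all_matches → Pre_solve all_matches → Spec_solve all_matches (solve all_matches)

-- ===== LEMMAS AND PROOFS =====

-- simulation: A's go-loop at row `fixed.length` equals B's loop over the same suffix
-- of candidates, with the already-built prefix factored out in front.
theorem searchAGo_eq_goBLoop (am : List (List Int)) :
    ∀ (fuel : Nat) (fixed : List Int) (used : PySem.Set Int) (cs : List Int) (rest' : List (List Int)),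
      fixed.length + 1 + rest'.length = am.length →
      am.drop (fixed.length + 1) = rest' →
      rest'.length ≤ fuel →
      (∀ v : Int, v ∈ used ↔ v ∈ fixed) →
      searchAGo am fuel fixed cs = Option.map (fixed ++ ·) (goBLoop used cs rest') := by
  intro fuel
  induction fuel with
  | zero =>
    intro fixed used cs rest' hlen hdrop hfuel hmem
    have hr : rest' = [] := List.eq_nil_of_length_eq_zero (Nat.le_zero.mp hfuel)
    subst hr
    induction cs with
    | nil => simp [searchAGo, goBLoop]
    | cons val cs ihcs =>
      by_cases hv : val ∈ fixed
      · have hu : val ∈ used := (hmem val).mpr hv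
        simp [searchAGo, goBLoop, hv, hu, ihcs]
      · have hu : val ∉ used := fun h => hv ((hmem val).mp h)
        have hl : (fixed ++ [val]).length = am.length := by
          simp at hlen ⊢; omega
        simp [searchAGo, goBLoop, hv, hu, hl, goB]
  | succ f ih =>
    intro fixed used cs rest' hlen hdrop hfuel hmem
    induction cs with
    | nil => simp [searchAGo, goBLoop]
    | cons val cs ihcs =>
      by_cases hv : val ∈ fixed
      · have hu : val ∈ used := (hmem val).mpr hv
        simp [searchAGo, goBLoop, hv, hu, ihcs]
      · have hu : val ∉ used := fun h => hv ((hmem val).mp h)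
        cases rest' with
        | nil =>
          have hl : (fixed ++ [val]).length = am.length := by
            simp at hlen ⊢; omega
          simp [searchAGo, goBLoop, hv, hu, hl, goB]
        | cons c2 r2 =>
          have hl : ¬ (fixed ++ [val]).length = am.length := by
            simp at hlen ⊢; omega
          -- A recurses into the next row; unfold one step of searchA there
          have hget : am[fixed.length + 1]? = some c2 := by
            have h0 : (List.drop (fixed.length + 1) am)[0]? = am[fixed.length + 1 + 0]? :=
              List.getElem?_drop
            rw [hdrop] at h0
            simpa using h0.symm
          have hdrop2 : am.drop ((fixed ++ [val]).length + 1) = r2 := by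
            have h1 : am.drop (fixed.length + 1 + 1) = r2 := by
              rw [← List.drop_drop, hdrop]; rfl
            simpa [Nat.add_assoc] using h1
          have hrec := ih (fixed ++ [val]) (PySem.Set.add used val) c2 r2
            (by simp at hlen ⊢; omega)
            (by simpa using hdrop2)
            (by simp at hfuel; omega)
            (by
              intro v
              rw [PySem.Set.mem_add]
              constructor
              · rintro (h | h)
                · exact List.mem_append_left _ ((hmem v).mp h)
                · subst h; exact List.mem_append_right _ (by simp)
              · intro h
                rcases List.mem_append.mp h with h | h
                · exact Or.inl ((hmem v).mpr h)
                · simp at h; exact Or.inr h)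
          have hA : searchA am (f + 1) (fixed ++ [val]) =
              searchAGo am f (fixed ++ [val]) c2 := by
            simp [searchA, List.length_append, hget]
          have hB : goB (PySem.Set.add used val) (c2 :: r2) =
              goBLoop (PySem.Set.add used val) c2 r2 := by simp [goB]
          -- assemble both sides
          show searchAGo am (f + 1) fixed (val :: cs) =
              Option.map (fixed ++ ·) (goBLoop used (val :: cs) (c2 :: r2))
          have hcont : ¬ PySem.Set.contains used val = true := by
            cases hx : PySem.Set.contains used val
            · simp
            · exact absurd ((PySem.Set.contains_iff used val).mp hx) hu
          rw [searchAGo, goBLoop]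
          simp only [hv, if_neg, not_false_iff]
          rw [if_neg hl, if_neg hcont, hA, hrec, hB]
          cases hres : goBLoop (PySem.Set.add used val) c2 r2 with
          | none => simpa using ihcs
          | some tail => simp [List.append_assoc]

theorem solve_eq (am : List (List Int)) (h : am ≠ []) : solve am = solve_alt am := by
  obtain ⟨a0, arest, rfl⟩ := List.exists_cons_of_ne_nil h
  have hA : searchA (a0 :: arest) (a0 :: arest).length [] = searchAGo (a0 :: arest) arest.length [] a0 := by
    simp [searchA, List.length_cons]
  have hmain := searchAGo_eq_goBLoop (a0 :: arest) arest.length [] PySem.Set.empty a0 arest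
    (by simp; omega) (by simp) (le_refl _)
    (by intro v; simp [PySem.Set.empty])
  have hB : goB PySem.Set.empty (a0 :: arest) = goBLoop PySem.Set.empty a0 arest := by
    simp [goB]
  unfold solve solve_alt
  rw [if_neg h, if_neg h, hA, hmain, hB]
  cases goBLoop PySem.Set.empty a0 arest <;> simp

-- ===== VERDICT (by name: the statement is the Claim_ definition above) =====
theorem solve_spec : Claim_equal_solve := by
  intro am _hdom hpre
  unfold Spec_solve
  exact solve_eq am hpre.1
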